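-- pv_equiv track=rewrite | github.com/Jawakaspa/kitviewsearchv53 | chargebase.py | parser_tags_adjs
-- ===== SOURCE A (Python) =====
-- TAG_SEPARATOR = ","
--
-- ADJ_GROUP_SEPARATOR = ","
--
-- ADJ_SEPARATOR = "|"
--
-- def parser_tags_adjs(canontags: str, canonadjs: str) -> list:
--     """
--     Parse les tags et leurs adjectifs associés.
--
--     Retourne une liste de tuples : [(tag, [adj1, adj2, ...]), ...]
--
--     Exemple :
--         canontags = "bruxisme,avulsion,Classe III"
--         canonadjs = ",immédiate,"
--         -> [("bruxisme", []), ("avulsion", ["immédiate"]), ("Classe III", [])]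
--     """
--     # Parser les tags
--     tags = [t.strip() for t in canontags.split(TAG_SEPARATOR)] if canontags.strip() else []
--
--     # Parser les groupes d'adjectifs
--     adj_groups = canonadjs.split(ADJ_GROUP_SEPARATOR) if canonadjs else []
--
--     # Compléter avec des groupes vides si nécessaire
--     while len(adj_groups) < len(tags):
--         adj_groups.append("")
--
--     # Construire la liste de résultats
--     result = []
--     for i, tag in enumerate(tags):
--         if not tag:
--             continue
--         adj_str = adj_groups[i] if i < len(adj_groups) else ""
--         adjs = [a.strip() for a in adj_str.split(ADJ_SEPARATOR) if a.strip()]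
--         result.append((tag, adjs))
--
--     return result
-- ===== SOURCE B (Python) =====
-- TAG_SEPARATOR = ","
--
-- ADJ_GROUP_SEPARATOR = ","
--
-- ADJ_SEPARATOR = "|"
--
--
-- def _pair(tags, groups):
--     """Recursively pair tags with adjective groups, building the result back-to-front."""
--     if not tags:
--         return []
--     head = groups[0] if groups else ""
--     rest = _pair(tags[1:], groups[1:])
--     if not tags[0]:
--         return rest
--     adjs = [a.strip() for a in head.split(ADJ_SEPARATOR) if a.strip()]
--     return [(tags[0], adjs)] + rest
--
--
-- def parser_tags_adjs(canontags: str, canonadjs: str) -> list: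
--     tags = [t.strip() for t in canontags.split(TAG_SEPARATOR)] if canontags.strip() else []
--     groups = canonadjs.split(ADJ_GROUP_SEPARATOR) if canonadjs else []
--     return _pair(tags, groups)
-- ===== Notes on version B (the rewrite author's own statement) =====
-- stated objective: alternative
-- what changed: Replaces A's while-loop padding of adj_groups and its index-based enumerate loop with guarded list indexing by a helper that recurses on the structure of the two lists simultaneously, taking the head group (or "" when exhausted) and prepending each pair to the recursively built tail, so no padding, no indices and no accumulator exist.
import Mathlib
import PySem

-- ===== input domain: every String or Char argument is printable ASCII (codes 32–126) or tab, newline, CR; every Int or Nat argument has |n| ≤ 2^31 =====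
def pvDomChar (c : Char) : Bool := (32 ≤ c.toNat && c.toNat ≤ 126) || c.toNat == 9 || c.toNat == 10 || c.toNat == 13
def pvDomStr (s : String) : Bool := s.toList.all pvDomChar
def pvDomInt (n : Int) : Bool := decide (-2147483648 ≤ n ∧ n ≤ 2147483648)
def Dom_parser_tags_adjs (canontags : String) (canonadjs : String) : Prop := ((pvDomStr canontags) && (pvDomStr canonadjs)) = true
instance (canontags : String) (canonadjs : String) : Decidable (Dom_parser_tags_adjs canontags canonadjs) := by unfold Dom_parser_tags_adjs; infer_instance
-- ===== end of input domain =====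

-- B replaces A's while-loop padding plus index-based enumerate loop by a structural
-- recursion over the two lists that builds the result back-to-front (objective: alternative).

-- s.split(sep) for a non-empty literal sep (split? is none only for sep = "")
def pvSplit (s : String) (sep : String) : List String :=
  (PySem.Str.split? s sep).getD []

-- ===== PORT A =====
-- [a.strip() for a in adj_str.split("|") if a.strip()]
def pvAdjsA (adj_str : String) : List String :=
  ((pvSplit adj_str "|").filter (fun a => PySem.Str.strip a ≠ "")).map
    (fun a => PySem.Str.strip a)

-- "while len(adj_groups) < len(tags): adj_groups.append("")"
def pvPad (adj_groups : List String) (n : Nat) : List String :=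
  if adj_groups.length < n then pvPad (adj_groups ++ [""]) n else adj_groups
termination_by n - adj_groups.length
decreasing_by simp_all; omega

def parser_tags_adjs (canontags : String) (canonadjs : String) : List (String × List String) :=
  let tags := if PySem.Str.strip canontags ≠ "" then
      (pvSplit canontags ",").map (fun t => PySem.Str.strip t) else []
  let adj_groups0 := if canonadjs ≠ "" then pvSplit canonadjs "," else []
  let adj_groups := pvPad adj_groups0 tags.length
  (PySem.List.enumerate tags).foldl
    (fun result p =>
      if p.2 = "" then result
      else
        let adj_str := if p.1 < (adj_groups.length : Int) then PySem.List.pyGetD adj_groups p.1 "" else ""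
        result ++ [(p.2, pvAdjsA adj_str)])
    []

-- ===== PORT B =====
-- [a.strip() for a in head.split("|") if a.strip()]
def pvAdjsB (head : String) : List String :=
  ((pvSplit head "|").filter (fun a => PySem.Str.strip a ≠ "")).map
    (fun a => PySem.Str.strip a)

-- _pair(tags, groups): structural recursion, prepending to the recursive result
def pvPair : List String → List String → List (String × List String)
  | [], _ => []
  | t :: ts, gs =>
      let head := gs.headD ""          -- groups[0] if groups else ""
      let rest := pvPair ts gs.tail    -- _pair(tags[1:], groups[1:])
      if t = "" then rest else (t, pvAdjsB head) :: rest

def parser_tags_adjs_alt (canontags : String) (canonadjs : String) : List (String × List String) :=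
  let tags := if PySem.Str.strip canontags ≠ "" then
      (pvSplit canontags ",").map (fun t => PySem.Str.strip t) else []
  let groups := if canonadjs ≠ "" then pvSplit canonadjs "," else []
  pvPair tags groups

-- ===== PRECONDITION & SPEC =====
def Spec_parser_tags_adjs (canontags : String) (canonadjs : String) (out : List (String × List String)) : Prop := out = parser_tags_adjs_alt canontags canonadjs
instance (canontags : String) (canonadjs : String) (out : List (String × List String)) : Decidable (Spec_parser_tags_adjs canontags canonadjs out) := by unfold Spec_parser_tags_adjs; infer_instance

-- ===== CLAIM (what is proved, stated in full; the proofs are below) =====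
def Claim_equal_parser_tags_adjs : Prop := ∀ (canontags : String) (canonadjs : String), Dom_parser_tags_adjs canontags canonadjs → Spec_parser_tags_adjs canontags canonadjs (parser_tags_adjs canontags canonadjs)

-- ===== LEMMAS AND PROOFS =====
lemma pvPad_getD (gs : List String) (n i : Nat) : (pvPad gs n).getD i "" = gs.getD i "" := by
  unfold pvPad
  split
  · rw [pvPad_getD (gs ++ [""]) n i]
    rcases Nat.lt_or_ge i gs.length with h | h
    · simp [List.getD, List.getElem?_append_left h]
    · rw [List.getD, List.getD, List.getElem?_append_right h]
      rcases Nat.eq_or_lt_of_le h with rfl | h'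
      · simp
      · rw [List.getElem?_eq_none (by simp; omega), List.getElem?_eq_none (by omega)]
  · rfl
termination_by n - gs.length
decreasing_by simp_all; omega

lemma pvPad_length (gs : List String) (n : Nat) : n ≤ (pvPad gs n).length := by
  unfold pvPad
  split
  · exact pvPad_length (gs ++ [""]) n
  · next h => omega
termination_by n - gs.length
decreasing_by simp_all; omega

lemma pvAdjs_eq : pvAdjsA = pvAdjsB := rfl

-- core correspondence: A's enumerate loop (absolute lookups into gs from offset s on,
-- appending to an accumulator) equals B's structural recursion on the suffix gs.drop s.
lemma pvLoop (ts : List String) : ∀ (gs : List String) (s : Nat) (acc : List (String × List String)),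
    (PySem.List.enumerate ts (s : Int)).foldl
      (fun r p => if p.2 = "" then r else r ++ [(p.2, pvAdjsA (gs.getD p.1.toNat ""))]) acc
    = acc ++ pvPair ts (gs.drop s) := by
  induction ts with
  | nil => intro gs s acc; simp [PySem.List.enumerate_nil, pvPair]
  | cons t rest ih =>
    intro gs s acc
    rw [PySem.List.enumerate_cons, List.foldl_cons]
    have hcast : (s : Int) + 1 = ((s + 1 : Nat) : Int) := by push_cast; ring
    have htail : (gs.drop s).tail = gs.drop (s + 1) := by
      rw [List.tail_drop]
    by_cases ht : t = ""
    · simp only [ht, ite_true, hcast]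
      rw [ih gs (s + 1) acc]
      simp [pvPair, htail]
    · simp only [ht, ite_false, Int.toNat_natCast, hcast]
      rw [ih gs (s + 1)]
      simp [pvPair, htail, ht, pvAdjs_eq]
theorem pv_main (canontags canonadjs : String) :
    parser_tags_adjs canontags canonadjs = parser_tags_adjs_alt canontags canonadjs := by
  unfold parser_tags_adjs parser_tags_adjs_alt
  set tags := (if PySem.Str.strip canontags ≠ "" then
      (pvSplit canontags ",").map (fun t => PySem.Str.strip t) else []) with htags
  set gs := (if canonadjs ≠ "" then pvSplit canonadjs "," else []) with hgs
  -- replace A's guarded pyGetD into the padded list by a plain getD into gs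
  have hcongr : (PySem.List.enumerate tags).foldl
      (fun result p =>
        if p.2 = "" then result
        else
          let adj_str := if p.1 < ((pvPad gs tags.length).length : Int) then
              PySem.List.pyGetD (pvPad gs tags.length) p.1 "" else ""
          result ++ [(p.2, pvAdjsA adj_str)]) []
    = (PySem.List.enumerate tags).foldl
      (fun r p => if p.2 = "" then r else r ++ [(p.2, pvAdjsA (gs.getD p.1.toNat ""))]) [] := by
    apply PySem.List.foldl_congr_mem
    intro acc p hp
    rcases (PySem.List.mem_enumerate_iff tags 0 p).1 hp with ⟨k, hk, hpe⟩
    subst hpe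
    by_cases ht : tags[k] = ""
    · simp [ht]
    · have hklt : ((0 : Int) + k) < ((pvPad gs tags.length).length : Int) := by
        have := pvPad_length gs tags.length
        omega
      simp only [if_neg ht, if_pos hklt]
      rw [show ((0 : Int) + (k : Int)) = ((k : Nat) : Int) by ring, PySem.List.pyGetD_natCast]
      have h2 := pvPad_getD gs tags.length k
      simp only [List.getD] at h2
      simp [h2]
  rw [hcongr]
  have := pvLoop tags gs 0 []
  simpa using this

-- ===== VERDICT (by name: the statement is the Claim_ definition above) =====
theorem parser_tags_adjs_spec : Claim_equal_parser_tags_adjs := by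
  intro canontags canonadjs _
  unfold Spec_parser_tags_adjs
  exact pv_main canontags canonadjs
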